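-- pv_equiv track=rewrite | github.com/brouwerict/PDF2UBL | src/pdf2ubl/extractors/table_extractor.py | _map_line_item_headers
-- ===== SOURCE A (Python) =====
-- from typing import List, Dict, Optional, Tuple, Any
--
-- def _map_line_item_headers(headers: List[str]) -> Dict[int, str]:
--     """Map table column indices to field names."""
--     mapping = {}
--
--     for i, header in enumerate(headers):
--         header_lower = header.lower()
--
--         if any(indicator in header_lower for indicator in ['beschrijving', 'description', 'omschrijving']):
--             mapping[i] = 'description'
--
--         elif any(indicator in header_lower for indicator in ['aantal', 'quantity', 'qty']):
--             mapping[i] = 'quantity'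
--
--         elif any(indicator in header_lower for indicator in ['prijs', 'price', 'unit']):
--             mapping[i] = 'unit_price'
--
--         elif any(indicator in header_lower for indicator in ['totaal', 'total', 'bedrag']):
--             mapping[i] = 'total_amount'
--
--         elif any(indicator in header_lower for indicator in ['btw', 'vat', 'tax']):
--             mapping[i] = 'vat_rate'
--
--     return mapping
-- ===== SOURCE B (Python) =====
-- from typing import List, Dict
--
-- FIELDS = [
--     ('description', ['beschrijving', 'description', 'omschrijving']),
--     ('quantity', ['aantal', 'quantity', 'qty']),
--     ('unit_price', ['prijs', 'price', 'unit']),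
--     ('total_amount', ['totaal', 'total', 'bedrag']),
--     ('vat_rate', ['btw', 'vat', 'tax']),
-- ]
--
-- def _map_line_item_headers(headers: List[str]) -> Dict[int, str]:
--     """Map table column indices to field names (field-major passes)."""
--     lowered = [h.lower() for h in headers]
--     assigned = {}
--     # one pass per field, in priority order: a column already claimed by an
--     # earlier (higher-priority) field is never overwritten
--     for field, kws in FIELDS:
--         for i, hl in enumerate(lowered):
--             if i not in assigned and any(k in hl for k in kws):
--                 assigned[i] = field
--     return {i: f for i, f in sorted(assigned.items(), key=lambda p: p[0])}
-- ===== Notes on version B (the rewrite author's own statement) =====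
-- stated objective: alternative
-- what changed: B inverts the loop nesting: instead of A's header-major single pass with a five-way if/elif chain, B makes one pass per field in priority order over the pre-lowered headers, claiming only still-unassigned column indices, and finally sorts the assignments by index to restore column order.
import Mathlib
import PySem

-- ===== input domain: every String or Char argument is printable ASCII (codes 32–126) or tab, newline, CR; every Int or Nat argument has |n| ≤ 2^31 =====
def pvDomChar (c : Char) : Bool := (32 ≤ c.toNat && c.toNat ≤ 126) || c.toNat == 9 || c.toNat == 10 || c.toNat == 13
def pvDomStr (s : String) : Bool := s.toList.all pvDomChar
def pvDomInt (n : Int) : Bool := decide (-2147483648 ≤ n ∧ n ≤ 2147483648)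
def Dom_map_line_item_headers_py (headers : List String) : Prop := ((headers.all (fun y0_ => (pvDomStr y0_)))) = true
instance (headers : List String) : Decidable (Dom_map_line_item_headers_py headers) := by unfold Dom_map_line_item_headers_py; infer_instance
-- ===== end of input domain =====

-- B inverts the loop nesting: field-major passes in priority order that claim
-- still-unassigned column indices, then a final sort by index, instead of A's
-- header-major single pass with an if/elif chain; same return value.

-- ===== PORT A =====
-- one loop iteration of A: the if/elif chain on the lowered header
def pvStepA (d : PySem.Dict Int String) (p : Int × String) : PySem.Dict Int String :=
  let hl := PySem.Str.lower p.2
  if ["beschrijving", "description", "omschrijving"].any (fun k => PySem.Str.isIn k hl) then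
    d.insert p.1 "description"
  else if ["aantal", "quantity", "qty"].any (fun k => PySem.Str.isIn k hl) then
    d.insert p.1 "quantity"
  else if ["prijs", "price", "unit"].any (fun k => PySem.Str.isIn k hl) then
    d.insert p.1 "unit_price"
  else if ["totaal", "total", "bedrag"].any (fun k => PySem.Str.isIn k hl) then
    d.insert p.1 "total_amount"
  else if ["btw", "vat", "tax"].any (fun k => PySem.Str.isIn k hl) then
    d.insert p.1 "vat_rate"
  else d

def map_line_item_headers_py (headers : List String) : List (Int × String) :=
  ((PySem.List.enumerate headers 0).foldl pvStepA PySem.Dict.empty).items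

-- ===== PORT B =====
def pvFIELDS : List (String × List String) :=
  [("description", ["beschrijving", "description", "omschrijving"]),
   ("quantity", ["aantal", "quantity", "qty"]),
   ("unit_price", ["prijs", "price", "unit"]),
   ("total_amount", ["totaal", "total", "bedrag"]),
   ("vat_rate", ["btw", "vat", "tax"])]

-- field-major loops: for each field in priority order, claim unassigned indices
def map_line_item_headers_py_alt (headers : List String) : List (Int × String) :=
  let lowered := headers.map (fun h => PySem.Str.lower h)
  let assigned := pvFIELDS.foldl
    (fun d q => (PySem.List.enumerate lowered 0).foldl
      (fun d' p =>
        if !(d'.contains p.1) && q.2.any (fun k => PySem.Str.isIn k p.2)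
        then d'.insert p.1 q.1 else d') d)
    PySem.Dict.empty
  PySem.List.sorted assigned.items (fun p => p.1) false

-- ===== PRECONDITION & SPEC =====
def Spec_map_line_item_headers_py (headers : List String) (out : List (Int × String)) : Prop := out = map_line_item_headers_py_alt headers
instance (headers : List String) (out : List (Int × String)) : Decidable (Spec_map_line_item_headers_py headers out) := by unfold Spec_map_line_item_headers_py; infer_instance

-- ===== CLAIM (what is proved, stated in full; the proofs are below) =====
def Claim_equal_map_line_item_headers_py : Prop := ∀ (headers : List String), Dom_map_line_item_headers_py headers → Spec_map_line_item_headers_py headers (map_line_item_headers_py headers)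

-- ===== LEMMAS AND PROOFS =====

-- first field of fl whose keywords match the (already lowered) header hl
def pvG (fl : List (String × List String)) (hl : String) : Option String :=
  (fl.find? (fun q => q.2.any (fun k => PySem.Str.isIn k hl))).map (fun q => q.1)

-- first field matching header h (both programs compute this per column)
def pvFieldFor (h : String) : Option String := pvG pvFIELDS (PySem.Str.lower h)

-- the common value: matched columns in index order
def pvTarget (headers : List String) : List (Int × String) :=
  (PySem.List.enumerate headers 0).filterMap
    (fun p => (pvFieldFor p.2).map (fun f => (p.1, f)))

-- ---- A side ----

lemma pvStepA_eq (d : PySem.Dict Int String) (p : Int × String) :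
    pvStepA d p = match pvFieldFor p.2 with
      | some f => d.insert p.1 f
      | none => d := by
  simp only [pvStepA, pvFieldFor, pvG, pvFIELDS, List.find?_cons, List.find?_nil]
  cases h1 : (["beschrijving", "description", "omschrijving"].any
      (fun k => PySem.Str.isIn k (PySem.Str.lower p.2))) <;>
    cases h2 : (["aantal", "quantity", "qty"].any
      (fun k => PySem.Str.isIn k (PySem.Str.lower p.2))) <;>
    cases h3 : (["prijs", "price", "unit"].any
      (fun k => PySem.Str.isIn k (PySem.Str.lower p.2))) <;>
    cases h4 : (["totaal", "total", "bedrag"].any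
      (fun k => PySem.Str.isIn k (PySem.Str.lower p.2))) <;>
    cases h5 : (["btw", "vat", "tax"].any
      (fun k => PySem.Str.isIn k (PySem.Str.lower p.2))) <;>
    simp [h1, h2, h3, h4, h5]

lemma pvMainA (l : List (Int × String)) (d : PySem.Dict Int String)
    (hfresh : ∀ p ∈ l, d.contains p.1 = false)
    (hnodup : (l.map (fun p => p.1)).Nodup) :
    (l.foldl pvStepA d).items
      = d.items ++ l.filterMap (fun p => (pvFieldFor p.2).map (fun f => (p.1, f))) := by
  induction l generalizing d with
  | nil => simp
  | cons p t ih =>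
    simp only [List.foldl_cons, List.filterMap_cons, pvStepA_eq]
    have hp : d.contains p.1 = false := hfresh p (List.mem_cons_self ..)
    simp only [List.map_cons, List.nodup_cons] at hnodup
    cases hf : pvFieldFor p.2 with
    | none =>
      simp only [Option.map_none]
      exact ih d (fun q hq => hfresh q (List.mem_cons_of_mem _ hq)) hnodup.2
    | some f =>
      simp only [Option.map_some]
      rw [ih (d.insert p.1 f) ?_ hnodup.2,
          PySem.Dict.items_insert_of_not_contains _ _ hp]
      · simp
      · intro q hq
        rw [PySem.Dict.contains_insert]
        have hne : q.1 ≠ p.1 := by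
          intro h
          exact hnodup.1 (h ▸ List.mem_map_of_mem hq)
        simp [hne, hfresh q (List.mem_cons_of_mem _ hq)]

lemma pvA_eq_target (headers : List String) :
    map_line_item_headers_py headers = pvTarget headers := by
  unfold map_line_item_headers_py pvTarget
  rw [pvMainA]
  · simp [PySem.Dict.empty]
  · intro p _; simp [PySem.Dict.contains_empty]
  · have := PySem.List.pairwise_lt_enumerate headers 0
    have h2 := List.Pairwise.map (fun p : Int × String => p.1) (fun a b h => h) this
    exact h2.imp (fun h => Int.ne_of_lt h)

-- ---- B side ----

-- the inner (per-field) pass: lookup after it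
lemma pvInnerGet (kws : List String) (f : String) (l : List (Int × String))
    (hn : (l.map (fun p => p.1)).Nodup) (d : PySem.Dict Int String) (j : Int) :
    (l.foldl (fun d' p =>
        if !(d'.contains p.1) && kws.any (fun k => PySem.Str.isIn k p.2)
        then d'.insert p.1 f else d') d).get? j =
      if l.any (fun p => p.1 == j && kws.any (fun k => PySem.Str.isIn k p.2))
          && !(d.contains j)
      then some f else d.get? j := by
  induction l generalizing d with
  | nil => simp
  | cons p t ih =>
    simp only [List.map_cons, List.nodup_cons] at hn
    simp only [List.foldl_cons, List.any_cons]
    by_cases hj : p.1 = j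
    · subst hj
      have hpj : (p.1 == p.1) = true := beq_self_eq_true p.1
      have ht : t.any (fun p' => p'.1 == p.1 && kws.any (fun k => PySem.Str.isIn k p'.2)) = false := by
        simp only [List.any_eq_false]
        intro q hq
        have : q.1 ≠ p.1 := fun h => hn.1 (h ▸ List.mem_map_of_mem hq)
        simp [this]
      by_cases hc : d.contains p.1 = true
      · have hcond : (!(d.contains p.1) && kws.any (fun k => PySem.Str.isIn k p.2)) = false := by
          rw [hc]; rfl
        have hL : ((t.any fun p' => p'.1 == p.1 && kws.any fun k => PySem.Str.isIn k p'.2)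
            && !(d.contains p.1)) = false := by rw [ht]; rfl
        have hR : (((p.1 == p.1 && kws.any fun k => PySem.Str.isIn k p.2)
            || t.any fun p' => p'.1 == p.1 && kws.any fun k => PySem.Str.isIn k p'.2)
            && !(d.contains p.1)) = false := by rw [hc]; simp
        rw [if_neg (by simp only [hcond]; exact Bool.false_ne_true), ih hn.2]
        rw [if_neg (by simp only [hL]; exact Bool.false_ne_true),
            if_neg (by simp only [hR]; exact Bool.false_ne_true)]
      · rw [Bool.not_eq_true] at hc
        by_cases hm : (kws.any (fun k => PySem.Str.isIn k p.2)) = true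
        · have hcond : (!(d.contains p.1) && kws.any (fun k => PySem.Str.isIn k p.2)) = true := by
            rw [hc, hm]; rfl
          rw [if_pos hcond, ih hn.2]
          have hL : ((t.any fun p' => p'.1 == p.1 && kws.any fun k => PySem.Str.isIn k p'.2)
              && !((d.insert p.1 f).contains p.1)) = false := by rw [ht]; rfl
          have hR : (((p.1 == p.1 && kws.any fun k => PySem.Str.isIn k p.2)
              || t.any fun p' => p'.1 == p.1 && kws.any fun k => PySem.Str.isIn k p'.2)
              && !(d.contains p.1)) = true := by rw [hpj, hm, ht, hc]; rfl
          rw [if_neg (by simp only [hL]; exact Bool.false_ne_true),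
              if_pos hR, PySem.Dict.get?_insert_self]
        · rw [Bool.not_eq_true] at hm
          have hcond : (!(d.contains p.1) && kws.any (fun k => PySem.Str.isIn k p.2)) = false := by
            rw [hc, hm]; rfl
          rw [if_neg (by simp only [hcond]; exact Bool.false_ne_true), ih hn.2]
          have hL : ((t.any fun p' => p'.1 == p.1 && kws.any fun k => PySem.Str.isIn k p'.2)
              && !(d.contains p.1)) = false := by rw [ht]; rfl
          have hR : (((p.1 == p.1 && kws.any fun k => PySem.Str.isIn k p.2)
              || t.any fun p' => p'.1 == p.1 && kws.any fun k => PySem.Str.isIn k p'.2)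
              && !(d.contains p.1)) = false := by rw [hpj, hm, ht]; rfl
          rw [if_neg (by simp only [hL]; exact Bool.false_ne_true),
              if_neg (by simp only [hR]; exact Bool.false_ne_true)]
    · -- p.1 ≠ j : the step never touches key j
      have hpj : (p.1 == j) = false := by simp [hj]
      have hg : ∀ (e : PySem.Dict Int String),
          ((if !(e.contains p.1) && kws.any (fun k => PySem.Str.isIn k p.2)
            then e.insert p.1 f else e)).get? j = e.get? j := by
        intro e; split
        · exact PySem.Dict.get?_insert_of_ne _ _ (Ne.symm hj)
        · rfl
      have hcont : ∀ (e : PySem.Dict Int String),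
          ((if !(e.contains p.1) && kws.any (fun k => PySem.Str.isIn k p.2)
            then e.insert p.1 f else e)).contains j = e.contains j := by
        intro e; split
        · have hjp : (j == p.1) = false := by
            simp only [beq_eq_false_iff_ne, ne_eq]
            exact Ne.symm hj
          rw [PySem.Dict.contains_insert, hjp, Bool.false_or]
        · rfl
      rw [ih hn.2, hg, hcont]
      have hhead : ((p.1 == j && kws.any fun k => PySem.Str.isIn k p.2)
          || t.any fun p' => p'.1 == j && kws.any fun k => PySem.Str.isIn k p'.2)
          = t.any fun p' => p'.1 == j && kws.any fun k => PySem.Str.isIn k p'.2 := by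
        rw [hpj]; rfl
      simp only [hhead]

-- contains as isSome of get?
lemma pvContains_eq (d : PySem.Dict Int String) (j : Int) :
    d.contains j = (d.get? j).isSome := PySem.Dict.contains_eq_isSome_get? d j

-- unique find? on a fst-Nodup list
lemma pvFindUnique : ∀ (l : List (Int × String)), (l.map (fun p => p.1)).Nodup →
    ∀ (j : Int) (p : Int × String), p ∈ l → p.1 = j → l.find? (fun q => q.1 == j) = some p
  | [], _, _, _, hp, _ => by cases hp
  | r :: t, hn, j, p, hp, hj => by
    simp only [List.map_cons, List.nodup_cons] at hn
    rcases List.mem_cons.mp hp with hp | hp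
    · subst hp; simp [hj]
    · have hne : r.1 ≠ j := fun h => hn.1 (by rw [h, ← hj]; exact List.mem_map_of_mem hp)
      have hrj : (r.1 == j) = false := by simp [hne]
      simp only [List.find?_cons, hrj]
      exact pvFindUnique t hn.2 j p hp hj

-- the outer (field) loop: lookup after all passes
lemma pvOuterGet (fl : List (String × List String)) (l : List (Int × String))
    (hn : (l.map (fun p => p.1)).Nodup) (d : PySem.Dict Int String) (j : Int) :
    (fl.foldl (fun d q => l.foldl
        (fun d' p =>
          if !(d'.contains p.1) && q.2.any (fun k => PySem.Str.isIn k p.2)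
          then d'.insert p.1 q.1 else d') d) d).get? j =
      match d.get? j with
      | some v => some v
      | none =>
        match l.find? (fun p => p.1 == j) with
        | some p => pvG fl p.2
        | none => none := by
  induction fl generalizing d with
  | nil =>
    cases hd : d.get? j with
    | some v => simp [hd]
    | none => cases l.find? (fun p => p.1 == j) <;> simp [hd, pvG]
  | cons q rest ih =>
    simp only [List.foldl_cons]
    rw [ih, pvInnerGet _ _ _ hn]
    cases hd : d.get? j with
    | some v =>
      have hc : d.contains j = true := by rw [pvContains_eq, hd]; rfl
      have hA : ((l.any fun p => p.1 == j && q.2.any fun k => PySem.Str.isIn k p.2)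
          && !(d.contains j)) = false := by rw [hc]; simp
      rw [if_neg (by simp only [hA]; exact Bool.false_ne_true)]
    | none =>
      have hc : d.contains j = false := by rw [pvContains_eq, hd]; rfl
      by_cases ha : (l.any fun p => p.1 == j && q.2.any fun k => PySem.Str.isIn k p.2) = true
      · have hA : ((l.any fun p => p.1 == j && q.2.any fun k => PySem.Str.isIn k p.2)
            && !(d.contains j)) = true := by rw [ha, hc]; rfl
        rw [if_pos hA]
        obtain ⟨p, hp, hcond⟩ := List.any_eq_true.mp ha
        obtain ⟨hpj, hm⟩ := Bool.and_eq_true_iff.mp hcond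
        have hfind : l.find? (fun p' => p'.1 == j) = some p :=
          pvFindUnique l hn j p hp (beq_iff_eq.mp hpj)
        rw [hfind]
        show some q.1 = pvG (q :: rest) p.2
        unfold pvG
        rw [List.find?_cons]
        cases hb : (q.2.any fun k => PySem.Str.isIn k p.2) with
        | true => rfl
        | false => rw [hb] at hm; cases hm
      · rw [Bool.not_eq_true] at ha
        have hA : ((l.any fun p => p.1 == j && q.2.any fun k => PySem.Str.isIn k p.2)
            && !(d.contains j)) = false := by rw [ha]; rfl
        rw [if_neg (by simp only [hA]; exact Bool.false_ne_true)]
        cases hfind : l.find? (fun p => p.1 == j) with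
        | none => simp
        | some p =>
          have hp := List.mem_of_find?_eq_some hfind
          have hm : q.2.any (fun k => PySem.Str.isIn k p.2) = false := by
            have h1 := List.any_eq_false.mp ha p hp
            have hpj := List.find?_some (p := fun p : Int × String => p.1 == j) hfind
            simp only [beq_iff_eq] at hpj
            simpa [hpj] using h1
          show pvG rest p.2 = pvG (q :: rest) p.2
          unfold pvG
          rw [List.find?_cons]
          cases hb : (q.2.any fun k => PySem.Str.isIn k p.2) with
          | true => rw [hb] at hm; cases hm
          | false => rfl

-- keys stay Nodup through both loops
lemma pvNodupInner (kws : List String) (f : String) (l : List (Int × String))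
    (d : PySem.Dict Int String) (h : d.keys.Nodup) :
    (l.foldl (fun d' p =>
        if !(d'.contains p.1) && kws.any (fun k => PySem.Str.isIn k p.2)
        then d'.insert p.1 f else d') d).keys.Nodup := by
  induction l generalizing d with
  | nil => exact h
  | cons p t ih =>
    simp only [List.foldl_cons]
    apply ih
    split
    · exact PySem.Dict.nodup_keys_insert _ _ _ h
    · exact h

lemma pvNodupOuter (fl : List (String × List String)) (l : List (Int × String))
    (d : PySem.Dict Int String) (h : d.keys.Nodup) :
    (fl.foldl (fun d q => l.foldl
        (fun d' p =>
          if !(d'.contains p.1) && q.2.any (fun k => PySem.Str.isIn k p.2)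
          then d'.insert p.1 q.1 else d') d) d).keys.Nodup := by
  induction fl generalizing d with
  | nil => exact h
  | cons q rest ih => exact ih _ (pvNodupInner _ _ _ _ h)

-- enumerate of a mapped list
lemma pvEnumerateMap (g : String → String) (xs : List String) (s : Int) :
    PySem.List.enumerate (xs.map g) s
      = (PySem.List.enumerate xs s).map (fun p => (p.1, g p.2)) := by
  induction xs generalizing s with
  | nil => simp [PySem.List.enumerate_nil]
  | cons x t ih => simp [PySem.List.enumerate_cons, ih]

lemma pvEnumNodupFst (headers : List String) :
    ((PySem.List.enumerate headers 0).map (fun p => p.1)).Nodup := by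
  have := PySem.List.pairwise_lt_enumerate headers 0
  have h2 := List.Pairwise.map (fun p : Int × String => p.1) (fun a b h => h) this
  exact h2.imp (fun h => Int.ne_of_lt h)

lemma pvTargetPairwise (headers : List String) :
    (pvTarget headers).Pairwise (fun a b => a.1 < b.1) := by
  unfold pvTarget
  refine List.Pairwise.filterMap _ ?_ (PySem.List.pairwise_lt_enumerate headers 0)
  intro a a' hlt b hb b' hb'
  cases hf : pvFieldFor a.2 with
  | none => rw [hf] at hb; simp at hb
  | some v =>
    rw [hf] at hb
    simp only [Option.map_some, Option.some.injEq] at hb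
    cases hf' : pvFieldFor a'.2 with
    | none => rw [hf'] at hb'; simp at hb'
    | some v' =>
      rw [hf'] at hb'
      simp only [Option.map_some, Option.some.injEq] at hb'
      subst hb; subst hb'
      exact hlt

-- membership in B's assigned dict = membership in the target
lemma pvB_mem (headers : List String) (j : Int) (f : String) :
    ((pvFIELDS.foldl
      (fun d q => (PySem.List.enumerate (headers.map (fun h => PySem.Str.lower h)) 0).foldl
        (fun d' p =>
          if !(d'.contains p.1) && q.2.any (fun k => PySem.Str.isIn k p.2)
          then d'.insert p.1 q.1 else d') d)
      PySem.Dict.empty).get? j = some f) ↔ (j, f) ∈ pvTarget headers := by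
  rw [pvOuterGet]
  · rw [PySem.Dict.get?_empty]
    rw [pvEnumerateMap]
    rw [List.find?_map]
    unfold pvTarget
    constructor
    · intro h
      cases hfind : (PySem.List.enumerate headers 0).find? (fun p => p.1 == j) with
      | none =>
        rw [show ((fun q : Int × String => q.1 == j) ∘ (fun p : Int × String => (p.1, PySem.Str.lower p.2))) = (fun p : Int × String => p.1 == j) from rfl, hfind] at h
        simp at h
      | some p =>
        rw [show ((fun q : Int × String => q.1 == j) ∘ (fun p : Int × String => (p.1, PySem.Str.lower p.2))) = (fun p : Int × String => p.1 == j) from rfl, hfind] at h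
        simp only [Option.map_some] at h
        have hpj0 := List.find?_some hfind
        have hpj : p.1 = j := by simpa using hpj0
        have hpm := List.mem_of_find?_eq_some hfind
        apply List.mem_filterMap.mpr
        refine ⟨p, hpm, ?_⟩
        have : pvFieldFor p.2 = some f := h
        rw [this, hpj]
        rfl
    · intro h
      obtain ⟨p, hpm, hpf⟩ := List.mem_filterMap.mp h
      cases hff : pvFieldFor p.2 <;> rw [hff] at hpf <;> simp at hpf
      obtain ⟨hpj, hfv⟩ := hpf
      have := pvFindUnique (PySem.List.enumerate headers 0) (pvEnumNodupFst headers) j p hpm hpj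
      rw [show ((fun q : Int × String => q.1 == j) ∘ (fun p : Int × String => (p.1, PySem.Str.lower p.2))) = (fun p : Int × String => p.1 == j) from rfl, this]
      simp only [Option.map_some]
      show pvFieldFor p.2 = some f
      rw [hff, hfv]
  · rw [pvEnumerateMap]
    have : ((PySem.List.enumerate headers 0).map (fun p : Int × String => (p.1, PySem.Str.lower p.2))).map (fun p => p.1)
        = (PySem.List.enumerate headers 0).map (fun p => p.1) := by
      rw [List.map_map]; rfl
    rw [this]
    exact pvEnumNodupFst headers

-- ===== VERDICT (by name: the statement is the Claim_ definition above) =====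
theorem map_line_item_headers_py_spec : Claim_equal_map_line_item_headers_py := by
  intro headers _
  unfold Spec_map_line_item_headers_py
  rw [pvA_eq_target]
  show pvTarget headers = PySem.List.sorted
    ((pvFIELDS.foldl
      (fun d q => (PySem.List.enumerate (headers.map (fun h => PySem.Str.lower h)) 0).foldl
        (fun d' p =>
          if !(d'.contains p.1) && q.2.any (fun k => PySem.Str.isIn k p.2)
          then d'.insert p.1 q.1 else d')
        d)
      PySem.Dict.empty).items) (fun p => p.1) false
  have hkeys : (pvFIELDS.foldl
      (fun d q => (PySem.List.enumerate (headers.map (fun h => PySem.Str.lower h)) 0).foldl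
        (fun d' p =>
          if !(d'.contains p.1) && q.2.any (fun k => PySem.Str.isIn k p.2)
          then d'.insert p.1 q.1 else d')
        d)
      PySem.Dict.empty).keys.Nodup := pvNodupOuter _ _ _ (by simp)
  have hitemsNodup : (pvFIELDS.foldl
      (fun d q => (PySem.List.enumerate (headers.map (fun h => PySem.Str.lower h)) 0).foldl
        (fun d' p =>
          if !(d'.contains p.1) && q.2.any (fun k => PySem.Str.isIn k p.2)
          then d'.insert p.1 q.1 else d')
        d)
      PySem.Dict.empty).items.Nodup := by
    apply List.Nodup.of_map (fun p : Int × String => p.1)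
    exact hkeys
  have htgtPw := pvTargetPairwise headers
  have htgtNodup : (pvTarget headers).Nodup :=
    htgtPw.imp (fun h => by intro he; rw [he] at h; exact lt_irrefl _ h)
  have hperm : (pvTarget headers).Perm (pvFIELDS.foldl
      (fun d q => (PySem.List.enumerate (headers.map (fun h => PySem.Str.lower h)) 0).foldl
        (fun d' p =>
          if !(d'.contains p.1) && q.2.any (fun k => PySem.Str.isIn k p.2)
          then d'.insert p.1 q.1 else d')
        d)
      PySem.Dict.empty).items := by
    rw [List.perm_ext_iff_of_nodup htgtNodup hitemsNodup]
    rintro ⟨j, f⟩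
    rw [← pvB_mem headers j f]
    exact PySem.Dict.get?_eq_some_iff_mem_items _ j f hkeys
  exact (PySem.List.sorted_eq_of_perm_of_pairwise_lt _ _ _ hperm htgtPw).symm
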